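-- pv_equiv track=rewrite | github.com/ajordaan/advent-of-code | 2023/day-2/solution.py | game_is_valid
-- ===== SOURCE A (Python) =====
-- RED_CUBES = 12
--
-- GREEN_CUBES = 13
--
-- BLUE_CUBES = 14
--
-- def game_is_valid(cube_displays):
--     for cube_display in cube_displays:
--         if (
--             cube_display.get("red", 0) > RED_CUBES
--             or cube_display.get("green", 0) > GREEN_CUBES
--             or cube_display.get("blue", 0) > BLUE_CUBES
--         ):
--             return False
--     return True
-- ===== SOURCE B (Python) =====
-- RED_CUBES = 12
-- GREEN_CUBES = 13
-- BLUE_CUBES = 14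
--
-- def game_is_valid(cube_displays):
--     max_red = max_green = max_blue = 0
--     for d in cube_displays:
--         max_red = max(max_red, d.get("red", 0))
--         max_green = max(max_green, d.get("green", 0))
--         max_blue = max(max_blue, d.get("blue", 0))
--     return max_red <= RED_CUBES and max_green <= GREEN_CUBES and max_blue <= BLUE_CUBES
-- ===== Notes on version B (the rewrite author's own statement) =====
-- stated objective: alternative
-- what changed: Replaces the per-display short-circuit guard (return False inside the loop) with an aggregate-then-compare decomposition: one fold computing the maximum red/green/blue counts, followed by a single three-way comparison after the loop.
import Mathlib
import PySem

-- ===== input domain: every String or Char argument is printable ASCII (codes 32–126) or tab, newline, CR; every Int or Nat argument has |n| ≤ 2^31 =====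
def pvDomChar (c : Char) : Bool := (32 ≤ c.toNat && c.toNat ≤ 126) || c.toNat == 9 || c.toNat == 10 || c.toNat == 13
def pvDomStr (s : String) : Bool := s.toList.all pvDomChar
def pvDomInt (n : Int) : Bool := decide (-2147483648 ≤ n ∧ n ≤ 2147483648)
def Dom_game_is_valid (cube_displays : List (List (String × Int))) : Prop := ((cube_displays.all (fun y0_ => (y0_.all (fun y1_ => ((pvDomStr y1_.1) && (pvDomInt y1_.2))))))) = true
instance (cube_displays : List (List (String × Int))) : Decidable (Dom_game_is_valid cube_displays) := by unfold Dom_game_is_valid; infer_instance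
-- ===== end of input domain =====

-- B replaces A's per-display early-return guard with one fold computing the three
-- maxima, compared once after the loop (objective: alternative decomposition).

-- ===== PORT A =====
def RED_CUBES : Int := 12
def GREEN_CUBES : Int := 13
def BLUE_CUBES : Int := 14

-- A: scan the displays; return False at the first over-limit display, else True.
def game_is_valid (cube_displays : List (List (String × Int))) : Bool :=
  match cube_displays with
  | [] => true
  | d :: rest =>
    let cd := PySem.Dict.mk d
    if cd.getD "red" 0 > RED_CUBES ∨ cd.getD "green" 0 > GREEN_CUBES ∨
       cd.getD "blue" 0 > BLUE_CUBES then
      false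
    else
      game_is_valid rest

-- ===== PORT B =====
-- B: fold accumulating the maximum red/green/blue seen, then one comparison.
def game_is_valid_altAux (cube_displays : List (List (String × Int)))
    (mr mg mb : Int) : Int × Int × Int :=
  match cube_displays with
  | [] => (mr, mg, mb)
  | d :: rest =>
    let cd := PySem.Dict.mk d
    game_is_valid_altAux rest (max mr (cd.getD "red" 0))
      (max mg (cd.getD "green" 0)) (max mb (cd.getD "blue" 0))

def game_is_valid_alt (cube_displays : List (List (String × Int))) : Bool :=
  let m := game_is_valid_altAux cube_displays 0 0 0
  m.1 ≤ RED_CUBES ∧ m.2.1 ≤ GREEN_CUBES ∧ m.2.2 ≤ BLUE_CUBES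

-- ===== PRECONDITION & SPEC =====
def Spec_game_is_valid (cube_displays : List (List (String × Int))) (out : Bool) : Prop := out = game_is_valid_alt cube_displays
instance (cube_displays : List (List (String × Int))) (out : Bool) : Decidable (Spec_game_is_valid cube_displays out) := by unfold Spec_game_is_valid; infer_instance

-- ===== CLAIM (what is proved, stated in full; the proofs are below) =====
def Claim_equal_game_is_valid : Prop := ∀ (cube_displays : List (List (String × Int))), Dom_game_is_valid cube_displays → Spec_game_is_valid cube_displays (game_is_valid cube_displays)

-- ===== LEMMAS AND PROOFS =====

-- invariant: B's fold starting from (mr,mg,mb) stays within limits iff the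
-- accumulators already are and A accepts the remaining displays
theorem altAux_le_iff (l : List (List (String × Int))) (mr mg mb : Int) :
    ((game_is_valid_altAux l mr mg mb).1 ≤ RED_CUBES ∧
     (game_is_valid_altAux l mr mg mb).2.1 ≤ GREEN_CUBES ∧
     (game_is_valid_altAux l mr mg mb).2.2 ≤ BLUE_CUBES) ↔
    ((mr ≤ RED_CUBES ∧ mg ≤ GREEN_CUBES ∧ mb ≤ BLUE_CUBES) ∧ game_is_valid l = true) := by
  induction l generalizing mr mg mb with
  | nil => simp [game_is_valid_altAux, game_is_valid]
  | cons d rest ih =>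
    simp only [game_is_valid_altAux, game_is_valid, ih]
    by_cases h : (PySem.Dict.mk d).getD "red" 0 > RED_CUBES ∨
        (PySem.Dict.mk d).getD "green" 0 > GREEN_CUBES ∨
        (PySem.Dict.mk d).getD "blue" 0 > BLUE_CUBES
    · simp only [if_pos h]
      constructor
      · rintro ⟨⟨hr, hg, hb⟩, _⟩
        rcases h with h | h | h <;> simp_all <;> omega
      · rintro ⟨_, hfalse⟩; simp at hfalse
    · simp only [if_neg h]
      push Not at h
      constructor
      · rintro ⟨⟨hr, hg, hb⟩, hrest⟩
        exact ⟨⟨(max_le_iff.mp hr).1, (max_le_iff.mp hg).1, (max_le_iff.mp hb).1⟩, hrest⟩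
      · rintro ⟨⟨hr, hg, hb⟩, hrest⟩
        exact ⟨⟨max_le hr h.1, max_le hg h.2.1, max_le hb h.2.2⟩, hrest⟩

-- ===== VERDICT (by name: the statement is the Claim_ definition above) =====
theorem game_is_valid_spec : Claim_equal_game_is_valid := by
  intro l _
  show game_is_valid l = game_is_valid_alt l
  have h := altAux_le_iff l 0 0 0
  have h2 : ((game_is_valid_altAux l 0 0 0).1 ≤ RED_CUBES ∧
      (game_is_valid_altAux l 0 0 0).2.1 ≤ GREEN_CUBES ∧
      (game_is_valid_altAux l 0 0 0).2.2 ≤ BLUE_CUBES) ↔ game_is_valid l = true := by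
    rw [h]
    constructor
    · exact And.right
    · intro ha
      exact ⟨⟨by norm_num [RED_CUBES], by norm_num [GREEN_CUBES], by norm_num [BLUE_CUBES]⟩, ha⟩
  unfold game_is_valid_alt
  cases hA : game_is_valid l
  · rw [hA] at h2
    simp only [Bool.false_eq_true, iff_false] at h2
    exact (decide_eq_false h2).symm
  · rw [hA] at h2
    simp only [iff_true] at h2
    exact (decide_eq_true h2).symm
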